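-- pv_equiv track=rewrite | github.com/MistakenPirate/cd_practice | dfa_last_a.py | dfa_last_a
-- ===== SOURCE A (Python) =====
-- def dfa_last_a(s):
--     state = 'q0'
--
--     for char in s:
--         if state == 'q0':
--             if char == 'a':
--                 state = 'q1'
--             elif char == 'b':
--                 state = 'q0'
--
--         elif state == 'q1':
--             if char == 'a':
--                 state = 'q1'
--             elif char == 'b':
--                 state = 'q0'
--
--     return state == 'q1'
-- ===== SOURCE B (Python) =====
-- def dfa_last_a(s):
--     for char in reversed(s):
--         if char == 'a':
--             return True
--         if char == 'b':
--             return False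
--     return False
-- ===== Notes on version B (the rewrite author's own statement) =====
-- stated objective: faster
-- what changed: Replaces the forward DFA state-machine pass over the whole string with a backward early-exit scan that stops at the last decision-relevant character.
import Mathlib
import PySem

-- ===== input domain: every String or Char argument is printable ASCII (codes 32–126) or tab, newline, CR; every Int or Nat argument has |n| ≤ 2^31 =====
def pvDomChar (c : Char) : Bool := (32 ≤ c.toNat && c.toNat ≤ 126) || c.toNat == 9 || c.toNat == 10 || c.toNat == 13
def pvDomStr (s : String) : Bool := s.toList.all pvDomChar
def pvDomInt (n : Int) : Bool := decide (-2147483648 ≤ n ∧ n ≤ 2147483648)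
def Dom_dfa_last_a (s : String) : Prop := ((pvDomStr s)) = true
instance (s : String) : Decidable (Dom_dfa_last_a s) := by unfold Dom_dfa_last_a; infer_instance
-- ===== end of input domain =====

-- B replaces A's forward DFA state pass by a backward early-exit scan; same return value on all inputs.
-- ===== PORT A =====
-- state is 'q0'/'q1'; both states move to q1 on 'a', to q0 on 'b', stay put otherwise.
def dfaStepA (state : String) (char : Char) : String :=
  if state = "q0" then
    (if char = 'a' then "q1" else if char = 'b' then "q0" else state)
  else if state = "q1" then
    (if char = 'a' then "q1" else if char = 'b' then "q0" else state)
  else state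

def dfa_last_a (s : String) : Bool :=
  (s.toList.foldl dfaStepA "q0") = "q1"

-- ===== PORT B =====
-- backward scan: first 'a' → true, first 'b' → false, end of string → false
def lastABScan : List Char → Bool
  | [] => false
  | c :: rest => if c = 'a' then true else if c = 'b' then false else lastABScan rest

def dfa_last_a_alt (s : String) : Bool :=
  lastABScan s.toList.reverse

-- ===== PRECONDITION & SPEC =====
def Spec_dfa_last_a (s : String) (out : Bool) : Prop := out = dfa_last_a_alt s
instance (s : String) (out : Bool) : Decidable (Spec_dfa_last_a s out) := by unfold Spec_dfa_last_a; infer_instance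

-- ===== CLAIM (what is proved, stated in full; the proofs are below) =====
def Claim_equal_dfa_last_a : Prop := ∀ (s : String), Dom_dfa_last_a s → Spec_dfa_last_a s (dfa_last_a s)

-- ===== LEMMAS AND PROOFS =====
theorem dfa_state_mem (l : List Char) :
    l.foldl dfaStepA "q0" = "q0" ∨ l.foldl dfaStepA "q0" = "q1" := by
  induction l using List.reverseRecOn with
  | nil => left; rfl
  | append_singleton l' c' ih' =>
    rw [List.foldl_append, List.foldl_cons, List.foldl_nil]
    rcases ih' with h | h <;> rw [h] <;>
      by_cases hca : c' = 'a' <;> by_cases hcb : c' = 'b' <;> simp [dfaStepA, hca, hcb]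

theorem foldl_dfa_eq_scan (l : List Char) :
    ((l.foldl dfaStepA "q0") = "q1" : Bool) = lastABScan l.reverse := by
  induction l using List.reverseRecOn with
  | nil => simp [lastABScan]
  | append_singleton l c ih =>
    rw [List.foldl_append, List.reverse_append]
    simp only [List.foldl_cons, List.foldl_nil, List.reverse_singleton, List.singleton_append,
      lastABScan]
    have hmem := dfa_state_mem l
    by_cases ha : c = 'a'
    · have hst : dfaStepA (l.foldl dfaStepA "q0") 'a' = "q1" := by
        rcases hmem with h | h <;> rw [h] <;> simp [dfaStepA]
      simp [ha, hst]
    · by_cases hb : c = 'b'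
      · have hst : dfaStepA (l.foldl dfaStepA "q0") 'b' = "q0" := by
          rcases hmem with h | h <;> rw [h] <;> simp [dfaStepA]
        simp [hb, hst]
      · have hst : dfaStepA (l.foldl dfaStepA "q0") c = l.foldl dfaStepA "q0" := by
          simp [dfaStepA, ha, hb]
        simp [ha, hb, hst, ih]

-- ===== VERDICT (by name: the statement is the Claim_ definition above) =====
theorem dfa_last_a_spec : Claim_equal_dfa_last_a := by
  intro s _
  unfold Spec_dfa_last_a dfa_last_a dfa_last_a_alt
  exact foldl_dfa_eq_scan s.toList
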